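-- pv_equiv track=rewrite | github.com/PranavKumarAV/Vertex_Cover_Problem | A1/a1ece650.py | check_fn
-- ===== SOURCE A (Python) =====
-- def check_fn(streets, intersections):
--     for s1 in streets:
--         for p in streets[s1]:
--             for street in streets:
--                 if s1 != street:
--                     if p in streets[street] and p not in intersections:
--                         intersections.append(p)
--
--     return intersections
-- ===== SOURCE B (Python) =====
-- def check_fn(streets, intersections):
--     # Count, for each point, how many distinct streets contain it; then one
--     # ordered pass appending points contained in >= 2 streets, with a seen-set.
--     # Like A, appends to `intersections` in place and returns it.
--     count = {}
--     for pts in streets.values():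
--         for p in dict.fromkeys(pts):
--             count[p] = count.get(p, 0) + 1
--     seen = set(intersections)
--     for pts in streets.values():
--         for p in pts:
--             if count.get(p, 0) >= 2 and p not in seen:
--                 intersections.append(p)
--                 seen.add(p)
--     return intersections
-- ===== Notes on version B (the rewrite author's own statement) =====
-- stated objective: faster
-- what changed: Replaced A's triple nested scan (for every point of every street, rescan all other streets' point lists and the output list) by a one-shot per-point distinct-street counter dict plus a single ordered pass with a seen-set.
import Mathlib
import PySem

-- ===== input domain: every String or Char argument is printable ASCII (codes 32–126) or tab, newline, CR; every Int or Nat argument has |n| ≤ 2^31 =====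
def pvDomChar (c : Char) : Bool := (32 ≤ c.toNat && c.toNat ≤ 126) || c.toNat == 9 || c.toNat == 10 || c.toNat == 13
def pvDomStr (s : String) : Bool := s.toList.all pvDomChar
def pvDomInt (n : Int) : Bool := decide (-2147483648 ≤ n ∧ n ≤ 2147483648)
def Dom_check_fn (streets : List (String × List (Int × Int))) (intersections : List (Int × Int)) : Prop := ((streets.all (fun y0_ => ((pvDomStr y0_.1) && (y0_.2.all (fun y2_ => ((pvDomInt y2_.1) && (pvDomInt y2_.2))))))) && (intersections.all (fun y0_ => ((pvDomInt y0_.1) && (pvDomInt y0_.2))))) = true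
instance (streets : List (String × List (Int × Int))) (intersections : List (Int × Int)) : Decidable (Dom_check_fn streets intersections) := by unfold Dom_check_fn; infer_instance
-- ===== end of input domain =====

-- B replaces A's quadratic all-pairs street scan by a per-point street counter plus one
-- ordered pass with a seen-set (asymptotically faster). Both A and B append to
-- `intersections` in place in Python (same side effect); the theorem is about the return value.

-- ===== PORT A =====
-- A's `streets` is a Python dict: modelled as PySem.Dict.ofList streets.
-- `streets[s1]` is looked up with getD [] — the key is always present (it comes from the key list).
def check_fn (streets : List (String × List (Int × Int))) (intersections : List (Int × Int)) : List (Int × Int) :=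
  let d := PySem.Dict.ofList streets
  d.keys.foldl (fun inters s1 =>
    (d.getD s1 []).foldl (fun inters p =>
      d.keys.foldl (fun inters street =>
        if s1 ≠ street then
          if p ∈ d.getD street [] ∧ p ∉ inters then inters ++ [p] else inters
        else inters) inters) inters) intersections

-- ===== PORT B =====
-- count: point ↦ number of distinct streets containing it (dict.fromkeys dedup = PySem.List.dedup);
-- then one pass over the streets in order, appending not-yet-seen points with count ≥ 2.
def check_fn_alt (streets : List (String × List (Int × Int))) (intersections : List (Int × Int)) : List (Int × Int) :=
  let d := PySem.Dict.ofList streets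
  let count : PySem.Dict (Int × Int) Int :=
    d.values.foldl (fun c pts =>
      (PySem.List.dedup pts).foldl (fun c p => c.modify p 0 (· + 1)) c) PySem.Dict.empty
  (d.values.foldl
      (fun (acc : List (Int × Int) × PySem.Set (Int × Int)) pts =>
        pts.foldl (fun acc p =>
          if 2 ≤ count.getD p 0 ∧ p ∉ acc.2 then (acc.1 ++ [p], PySem.Set.add acc.2 p) else acc) acc)
      (intersections, PySem.Set.ofList intersections)).1

-- ===== PRECONDITION & SPEC =====
def Spec_check_fn (streets : List (String × List (Int × Int))) (intersections : List (Int × Int)) (out : List (Int × Int)) : Prop := out = check_fn_alt streets intersections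
instance (streets : List (String × List (Int × Int))) (intersections : List (Int × Int)) (out : List (Int × Int)) : Decidable (Spec_check_fn streets intersections out) := by unfold Spec_check_fn; infer_instance

-- ===== CLAIM (what is proved, stated in full; the proofs are below) =====
def Claim_equal_check_fn : Prop := ∀ (streets : List (String × List (Int × Int))) (intersections : List (Int × Int)), Dom_check_fn streets intersections → Spec_check_fn streets intersections (check_fn streets intersections)

-- ===== LEMMAS AND PROOFS =====

-- A's inner loop over all streets appends p (once) iff some OTHER street contains p and p is new.
theorem pvInnerA (keys : List String) (f : String → List (Int × Int)) (s1 : String)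
    (p : Int × Int) (acc : List (Int × Int)) :
    keys.foldl (fun inters street =>
      if s1 ≠ street then
        if p ∈ f street ∧ p ∉ inters then inters ++ [p] else inters
      else inters) acc
    = if (∃ st ∈ keys, st ≠ s1 ∧ p ∈ f st) ∧ p ∉ acc then acc ++ [p] else acc := by
  induction keys generalizing acc with
  | nil => simp
  | cons k ks ih =>
    simp only [List.foldl_cons]
    by_cases h3 : p ∈ acc
    · have hhead : (if s1 ≠ k then if p ∈ f k ∧ p ∉ acc then acc ++ [p] else acc else acc) = acc := by
        split_ifs with h1 h2
        · exact absurd h3 h2.2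
        · rfl
        · rfl
      rw [hhead, ih, if_neg (fun h => h.2 h3), if_neg (fun h => h.2 h3)]
    · by_cases hc : s1 ≠ k ∧ p ∈ f k
      · have hhead : (if s1 ≠ k then if p ∈ f k ∧ p ∉ acc then acc ++ [p] else acc else acc)
            = acc ++ [p] := by rw [if_pos hc.1, if_pos ⟨hc.2, h3⟩]
        rw [hhead, ih, if_neg (fun h => h.2 (by simp)),
            if_pos ⟨⟨k, by simp, fun h => hc.1 h.symm, hc.2⟩, h3⟩]
      · have hhead : (if s1 ≠ k then if p ∈ f k ∧ p ∉ acc then acc ++ [p] else acc else acc)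
            = acc := by
          rcases not_and_or.mp hc with h | h
          · rw [if_neg h]
          · by_cases h1 : s1 ≠ k
            · rw [if_pos h1, if_neg (fun hh => h hh.1)]
            · rw [if_neg h1]
        rw [hhead, ih]
        refine if_congr (and_congr_left' ⟨fun ⟨st, hst, h⟩ => ⟨st, List.mem_cons_of_mem _ hst, h⟩,
          fun ⟨st, hst, hne, hpf⟩ => ?_⟩) rfl rfl
        rcases List.mem_cons.mp hst with rfl | hst'
        · exact absurd ⟨fun h => hne h.symm, hpf⟩ hc
        · exact ⟨st, hst', hne, hpf⟩

-- two distinct members force length ≥ 2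
theorem pvTwoOfNe {α : Type} (L : List α) (a b : α) (ha : a ∈ L) (hb : b ∈ L) (hab : a ≠ b) :
    2 ≤ L.length := by
  rcases L with _ | ⟨x, _ | ⟨y, t⟩⟩
  · simp at ha
  · simp at ha hb
    exact absurd (ha.trans hb.symm) hab
  · simp only [List.length_cons]
    omega

-- a nodup list of length ≥ 2 has a member different from any given member
theorem pvNeOfTwo {α : Type} (L : List α) (hn : L.Nodup) (a : α) (h2 : 2 ≤ L.length) :
    ∃ b ∈ L, b ≠ a := by
  rcases L with _ | ⟨x, _ | ⟨y, t⟩⟩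
  · simp at h2
  · simp at h2
  · have hxy : x ≠ y := fun h =>
      (List.nodup_cons.mp hn).1 (by rw [h]; exact List.mem_cons_self ..)
    by_cases hx : x = a
    · exact ⟨y, by simp, fun h => hxy (by rw [hx, h])⟩
    · exact ⟨x, by simp, hx⟩

-- for an item (s1, pts) of a nodup-keyed item list and p ∈ pts:
-- "some other item contains p" ↔ "at least two items contain p"
theorem pvTwoIff (l : List (String × List (Int × Int))) (hn : (l.map Prod.fst).Nodup)
    (s1 : String) (pts : List (Int × Int)) (hmem : (s1, pts) ∈ l)
    (p : Int × Int) (hp : p ∈ pts) :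
    (∃ it ∈ l, it.1 ≠ s1 ∧ p ∈ it.2) ↔ 2 ≤ l.countP (fun it => decide (p ∈ it.2)) := by
  have hln : l.Nodup := hn.of_map
  have hF : l.countP (fun it => decide (p ∈ it.2)) = (l.filter (fun it => decide (p ∈ it.2))).length :=
    List.countP_eq_length_filter ..
  have hmf : (s1, pts) ∈ l.filter (fun it => decide (p ∈ it.2)) := by
    simp [List.mem_filter, hmem, hp]
  constructor
  · rintro ⟨it, hit, hne, hpit⟩
    have hitf : it ∈ l.filter (fun it => decide (p ∈ it.2)) := by simp [List.mem_filter, hit, hpit]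
    rw [hF]
    exact pvTwoOfNe _ it (s1, pts) hitf hmf (fun h => hne (by simp [h]))
  · intro h2
    rw [hF] at h2
    obtain ⟨b, hbf, hbne⟩ := pvNeOfTwo _ (hln.filter _) (s1, pts) h2
    have hbl : b ∈ l := (List.mem_filter.mp hbf).1
    have hbp : p ∈ b.2 := by simpa using (List.mem_filter.mp hbf).2
    refine ⟨b, hbl, fun hb1 => ?_, hbp⟩
    exact hbne (List.inj_on_of_nodup_map hn hbl hmem (by simpa using hb1))

-- translate "∃ key in keys with p in its value" into "∃ item"
theorem pvExistsIff (d : PySem.Dict String (List (Int × Int))) (hn : d.keys.Nodup)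
    (s1 : String) (p : Int × Int) :
    (∃ st ∈ d.keys, st ≠ s1 ∧ p ∈ d.getD st []) ↔ (∃ it ∈ d.items, it.1 ≠ s1 ∧ p ∈ it.2) := by
  constructor
  · rintro ⟨st, hst, hne, hpst⟩
    have : ∃ kv ∈ d.items, kv.1 = st := by
      simpa [List.mem_map] using (show st ∈ d.items.map Prod.fst from hst)
    obtain ⟨kv, hkv, hkv1⟩ := this
    have hg : d.getD st [] = kv.2 := by
      subst hkv1
      exact PySem.Dict.getD_of_mem_items d (by simpa using hkv) hn []
    exact ⟨kv, hkv, hkv1 ▸ hne, hg ▸ hpst⟩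
  · rintro ⟨it, hit, hne, hpit⟩
    have hg : d.getD it.1 [] = it.2 :=
      PySem.Dict.getD_of_mem_items d (by simpa using hit) hn []
    exact ⟨it.1, by exact List.mem_map_of_mem hit, hne, hg ▸ hpit⟩

-- fold over keys with looked-up values = fold over items (nodup keys)
theorem pvMapFstFold {γ : Type} (l : List (String × List (Int × Int)))
    (f : String → List (Int × Int)) (g : γ → String → List (Int × Int) → γ) (init : γ)
    (h : ∀ kv ∈ l, f kv.1 = kv.2) :
    (l.map Prod.fst).foldl (fun a k => g a k (f k)) init = l.foldl (fun a kv => g a kv.1 kv.2) init := by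
  rw [List.foldl_map]
  exact PySem.List.foldl_congr_mem _ _ _ _ (fun acc x hx => by rw [h x hx])

-- value of B's counter: number of lists containing p
theorem pvCountVal (ptss : List (List (Int × Int))) (c0 : PySem.Dict (Int × Int) Int) (p : Int × Int) :
    (ptss.foldl (fun c pts =>
        (PySem.List.dedup pts).foldl (fun c q => c.modify q 0 (· + 1)) c) c0).getD p 0
      = c0.getD p 0 + (ptss.countP (fun pts => decide (p ∈ pts)) : Int) := by
  induction ptss generalizing c0 with
  | nil => simp
  | cons pts rest ih =>
    simp only [List.foldl_cons, ih, PySem.Dict.getD_foldl_modify_add_one]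
    have hc : (PySem.List.dedup pts).count p = if p ∈ pts then 1 else 0 := by
      by_cases hp : p ∈ pts
      · rw [if_pos hp]
        exact List.count_eq_one_of_mem (by simp [PySem.List.dedup_eq_ofList, PySem.Set.nodup_ofList])
          (by simp [hp])
      · rw [if_neg hp]
        exact List.count_eq_zero.mpr (by simp [hp])
    rw [hc, List.countP_cons]
    by_cases hp : p ∈ pts
    · simp [hp]
      ring
    · simp [hp]

-- B's paired fold (result list, seen set): the seen set mirrors membership in the result list
theorem pvPairFold (cnt : PySem.Dict (Int × Int) Int) (pts : List (Int × Int))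
    (res : List (Int × Int)) (seen : PySem.Set (Int × Int)) (hinv : ∀ x, x ∈ seen ↔ x ∈ res) :
    (pts.foldl (fun acc p =>
        if 2 ≤ cnt.getD p 0 ∧ p ∉ acc.2 then (acc.1 ++ [p], PySem.Set.add acc.2 p) else acc) (res, seen)).1
      = pts.foldl (fun r p => if 2 ≤ cnt.getD p 0 ∧ p ∉ r then r ++ [p] else r) res
    ∧ ∀ x, x ∈ (pts.foldl (fun acc p =>
        if 2 ≤ cnt.getD p 0 ∧ p ∉ acc.2 then (acc.1 ++ [p], PySem.Set.add acc.2 p) else acc) (res, seen)).2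
        ↔ x ∈ pts.foldl (fun r p => if 2 ≤ cnt.getD p 0 ∧ p ∉ r then r ++ [p] else r) res := by
  induction pts generalizing res seen with
  | nil => exact ⟨rfl, hinv⟩
  | cons p rest ih =>
    simp only [List.foldl_cons]
    by_cases hc : 2 ≤ cnt.getD p 0 ∧ p ∉ res
    · rw [if_pos ⟨hc.1, fun h => hc.2 ((hinv p).mp h)⟩, if_pos hc]
      exact ih (res ++ [p]) (PySem.Set.add seen p)
        (fun x => by simp [PySem.Set.mem_add, hinv x, or_comm])
    · rw [if_neg (fun h => hc ⟨h.1, fun hm => h.2 ((hinv p).mpr hm)⟩), if_neg hc]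
      exact ih res seen hinv

-- B's outer fold, projected to the result list
theorem pvOuterB (cnt : PySem.Dict (Int × Int) Int)
    (ptss : List (List (Int × Int))) (res : List (Int × Int)) (seen : PySem.Set (Int × Int))
    (hinv : ∀ x, x ∈ seen ↔ x ∈ res) :
    (ptss.foldl (fun acc pts => pts.foldl (fun acc p =>
        if 2 ≤ cnt.getD p 0 ∧ p ∉ acc.2 then (acc.1 ++ [p], PySem.Set.add acc.2 p) else acc) acc) (res, seen)).1
      = ptss.foldl (fun r pts => pts.foldl (fun r p =>
        if 2 ≤ cnt.getD p 0 ∧ p ∉ r then r ++ [p] else r) r) res := by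
  induction ptss generalizing res seen with
  | nil => rfl
  | cons pts rest ih =>
    simp only [List.foldl_cons]
    obtain ⟨h1, h2⟩ := pvPairFold cnt pts res seen hinv
    rcases hfold : pts.foldl (fun acc p =>
        if 2 ≤ cnt.getD p 0 ∧ p ∉ acc.2 then (acc.1 ++ [p], PySem.Set.add acc.2 p) else acc) (res, seen) with ⟨r', s'⟩
    rw [hfold] at h1 h2
    simp only at h1 h2
    rw [ih r' s' (h1 ▸ h2), h1]

-- ===== VERDICT (by name: the statement is the Claim_ definition above) =====
theorem check_fn_spec : Claim_equal_check_fn := by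
  intro streets intersections _
  unfold Spec_check_fn check_fn check_fn_alt
  simp only []
  set d := PySem.Dict.ofList streets with hd
  have hn : d.keys.Nodup := PySem.Dict.nodup_keys_ofList streets
  have hkeys : d.keys = d.items.map Prod.fst := rfl
  have hvals : d.values = d.items.map Prod.snd := rfl
  have hcount : ∀ p : Int × Int,
      ((d.items.map Prod.snd).foldl (fun c pts =>
        (PySem.List.dedup pts).foldl (fun c q => c.modify q 0 (· + 1)) c) PySem.Dict.empty).getD p 0
      = (d.items.countP (fun it => decide (p ∈ it.2)) : Int) := by
    intro p
    rw [pvCountVal, PySem.Dict.getD_empty, List.countP_map]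
    rw [zero_add]
    rfl
  -- B side: drop the seen-set pairing, then fold over items
  rw [pvOuterB (d.values.foldl (fun c pts =>
        (PySem.List.dedup pts).foldl (fun c q => c.modify q 0 (· + 1)) c)
        PySem.Dict.empty) d.values intersections (PySem.Set.ofList intersections)
      (fun x => by simp [PySem.Set.mem_ofList])]
  conv_rhs => rw [hvals, List.foldl_map]
  -- A side: keys → items, inner loop → existence condition
  rw [hkeys,
      pvMapFstFold d.items (fun k => d.getD k []) _ intersections
        (fun kv hkv => PySem.Dict.getD_of_mem_items d (by simpa using hkv) hn []),
      ← hkeys]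
  -- both are now folds over d.items; equate the bodies pointwise
  refine PySem.List.foldl_congr_mem _ _ _ _ (fun acc it hit => ?_)
  refine PySem.List.foldl_congr_mem _ _ _ _ (fun acc2 p hp => ?_)
  rw [pvInnerA]
  refine if_congr (and_congr_left' ?_) rfl rfl
  rw [pvExistsIff d hn it.1 p, hcount p,
      pvTwoIff d.items (hkeys ▸ hn) it.1 it.2 (by simpa using hit) p hp]
  exact ⟨fun h => by exact_mod_cast h, fun h => by exact_mod_cast h⟩
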